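-- pv_equiv track=rewrite | github.com/pypi-data/pypi-mirror-386 | packages/featrixsphere/featrixsphere-0.2.220-py3-none-any.whl/featrixsphere/client.py | _analyze_job_completion
-- ===== SOURCE A (Python) =====
-- from typing import Dict, Any, Optional, List, Tuple, Union
--
-- def _analyze_job_completion(jobs: Dict[str, Any]) -> str:
--     """
--     Analyze job completion status and provide detailed summary.
--
--     Args:
--         jobs: Dictionary of job information
--
--     Returns:
--         Formatted string describing job completion status
--     """
--     done_jobs = []
--     failed_jobs = []
--     cancelled_jobs = []
--
--     for job_id, job in jobs.items():
--         status = job.get('status', 'unknown')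
--         job_type = job.get('type', 'unknown')
--
--         if status == 'done':
--             done_jobs.append(f"{job_type} ({job_id})")
--         elif status == 'failed':
--             error_info = ""
--             # Look for error information in various possible fields
--             if 'error' in job:
--                 error_info = f" - Error: {job['error']}"
--             elif 'message' in job:
--                 error_info = f" - Message: {job['message']}"
--             failed_jobs.append(f"{job_type} ({job_id}){error_info}")
--         elif status == 'cancelled':
--             cancelled_jobs.append(f"{job_type} ({job_id})")
--
--     # Build summary message
--     summary_parts = []
--     if done_jobs:
--         summary_parts.append(f"✅ {len(done_jobs)} succeeded: {', '.join(done_jobs)}")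
--     if failed_jobs:
--         summary_parts.append(f"❌ {len(failed_jobs)} failed: {', '.join(failed_jobs)}")
--     if cancelled_jobs:
--         summary_parts.append(f"🚫 {len(cancelled_jobs)} cancelled: {', '.join(cancelled_jobs)}")
--
--     return " | ".join(summary_parts) if summary_parts else "No jobs found"
-- ===== SOURCE B (Python) =====
-- def _analyze_job_completion(jobs):
--     """Staged: for each status category in turn, filter the whole job list and
--     format its entries; no per-status accumulators are kept during a single pass."""
--     def fmt(job_id, job):
--         base = f"{job.get('type', 'unknown')} ({job_id})"
--         if job.get('status', 'unknown') == 'failed':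
--             if 'error' in job:
--                 return base + f" - Error: {job['error']}"
--             if 'message' in job:
--                 return base + f" - Message: {job['message']}"
--         return base
--
--     parts = []
--     for status, emoji, label in (('done', '\u2705', 'succeeded'),
--                                  ('failed', '\u274c', 'failed'),
--                                  ('cancelled', '\U0001f6ab', 'cancelled')):
--         entries = [fmt(jid, j) for jid, j in jobs.items()
--                    if j.get('status', 'unknown') == status]
--         if entries:
--             parts.append(f"{emoji} {len(entries)} {label}: {', '.join(entries)}")
--     return " | ".join(parts) if parts else "No jobs found"
-- ===== Notes on version B (the rewrite author's own statement) =====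
-- stated objective: alternative
-- what changed: Instead of A's single pass that classifies every job into three accumulator lists followed by three copy-pasted summary branches, B makes three staged passes: for each (status, emoji, label) row of an ordered table it filters the whole job list for that status and formats the matching entries via one shared formatter (which adds the error/message suffix only for failed jobs), then joins the non-empty parts.
import Mathlib
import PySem

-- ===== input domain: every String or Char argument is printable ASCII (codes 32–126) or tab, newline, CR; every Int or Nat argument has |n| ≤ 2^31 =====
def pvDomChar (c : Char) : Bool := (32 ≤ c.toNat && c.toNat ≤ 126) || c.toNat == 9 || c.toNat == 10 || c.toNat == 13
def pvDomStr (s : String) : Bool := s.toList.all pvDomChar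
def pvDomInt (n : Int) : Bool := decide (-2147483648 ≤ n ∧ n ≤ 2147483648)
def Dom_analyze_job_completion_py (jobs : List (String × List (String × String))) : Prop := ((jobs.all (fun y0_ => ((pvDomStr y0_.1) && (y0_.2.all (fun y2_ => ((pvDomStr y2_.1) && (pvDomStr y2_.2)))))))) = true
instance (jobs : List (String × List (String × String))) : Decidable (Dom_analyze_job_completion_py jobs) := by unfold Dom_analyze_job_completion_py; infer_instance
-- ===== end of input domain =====

-- B replaces A's single classifying pass with three accumulator lists and three copy-pasted summary
-- branches by three staged filter-and-format passes driven by an ordered (status, emoji, label) table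
-- (objective: alternative).

-- ===== PORT A =====
-- the for-loop over jobs.items() with its three accumulator lists
def pvLoopA : List (String × List (String × String)) → List String → List String → List String →
    List String × List String × List String
  | [], done_jobs, failed_jobs, cancelled_jobs => (done_jobs, failed_jobs, cancelled_jobs)
  | (job_id, jobL) :: rest, done_jobs, failed_jobs, cancelled_jobs =>
    let job := PySem.Dict.mk jobL
    let status := job.getD "status" "unknown"
    let job_type := job.getD "type" "unknown"
    if status = "done" then
      pvLoopA rest (done_jobs ++ [job_type ++ " (" ++ job_id ++ ")"]) failed_jobs cancelled_jobs
    else if status = "failed" then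
      -- job['error'] / job['message'] are guarded by 'in job', so getD with dummy default is exact
      let error_info :=
        if job.contains "error" then " - Error: " ++ job.getD "error" ""
        else if job.contains "message" then " - Message: " ++ job.getD "message" ""
        else ""
      pvLoopA rest done_jobs (failed_jobs ++ [job_type ++ " (" ++ job_id ++ ")" ++ error_info]) cancelled_jobs
    else if status = "cancelled" then
      pvLoopA rest done_jobs failed_jobs (cancelled_jobs ++ [job_type ++ " (" ++ job_id ++ ")"])
    else
      pvLoopA rest done_jobs failed_jobs cancelled_jobs

def analyze_job_completion_py (jobs : List (String × List (String × String))) : String :=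
  let r := pvLoopA jobs [] [] []
  let done_jobs := r.1
  let failed_jobs := r.2.1
  let cancelled_jobs := r.2.2
  let summary_parts : List String := []
  let summary_parts := if done_jobs.isEmpty then summary_parts else
    summary_parts ++ ["✅ " ++ PySem.Int.toStr done_jobs.length ++ " succeeded: " ++ PySem.Str.join ", " done_jobs]
  let summary_parts := if failed_jobs.isEmpty then summary_parts else
    summary_parts ++ ["❌ " ++ PySem.Int.toStr failed_jobs.length ++ " failed: " ++ PySem.Str.join ", " failed_jobs]
  let summary_parts := if cancelled_jobs.isEmpty then summary_parts else
    summary_parts ++ ["🚫 " ++ PySem.Int.toStr cancelled_jobs.length ++ " cancelled: " ++ PySem.Str.join ", " cancelled_jobs]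
  if summary_parts.isEmpty then "No jobs found" else PySem.Str.join " | " summary_parts

-- ===== PORT B =====
-- Source B's shared formatter fmt(job_id, job)
def pvFmtB (p : String × List (String × String)) : String :=
  let job := PySem.Dict.mk p.2
  let base := job.getD "type" "unknown" ++ " (" ++ p.1 ++ ")"
  if job.getD "status" "unknown" = "failed" then
    -- job['error'] / job['message'] are guarded by 'in job', so getD with dummy default is exact
    if job.contains "error" then base ++ (" - Error: " ++ job.getD "error" "")
    else if job.contains "message" then base ++ (" - Message: " ++ job.getD "message" "")
    else base
  else base

-- Source B's comprehension: one staged pass filtering the whole job list for one status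
def pvEntriesB (jobs : List (String × List (String × String))) (status : String) : List String :=
  (jobs.filter (fun it => (PySem.Dict.mk it.2).getD "status" "unknown" == status)).map pvFmtB

-- the ordered (status key, emoji, label) table Source B's outer loop walks
def pvTableB : List (String × String × String) :=
  [("done", "✅", "succeeded"), ("failed", "❌", "failed"), ("cancelled", "🚫", "cancelled")]

def analyze_job_completion_py_alt (jobs : List (String × List (String × String))) : String :=
  let parts := pvTableB.foldl (fun parts t =>
    let entries := pvEntriesB jobs t.1
    if entries.isEmpty then parts
    else parts ++ [t.2.1 ++ " " ++ PySem.Int.toStr entries.length ++ " " ++ t.2.2 ++ ": " ++ PySem.Str.join ", " entries]) []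
  if parts.isEmpty then "No jobs found" else PySem.Str.join " | " parts

-- ===== PRECONDITION & SPEC =====
def Spec_analyze_job_completion_py (jobs : List (String × List (String × String))) (out : String) : Prop := out = analyze_job_completion_py_alt jobs
instance (jobs : List (String × List (String × String))) (out : String) : Decidable (Spec_analyze_job_completion_py jobs out) := by unfold Spec_analyze_job_completion_py; infer_instance

-- ===== CLAIM (what is proved, stated in full; the proofs are below) =====
def Claim_equal_analyze_job_completion_py : Prop := ∀ (jobs : List (String × List (String × String))), Dom_analyze_job_completion_py jobs → Spec_analyze_job_completion_py jobs (analyze_job_completion_py jobs)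

-- ===== LEMMAS AND PROOFS =====

-- A's three accumulators are exactly B's three filtered, formatted passes
theorem pvLoop_eq (jobs : List (String × List (String × String))) :
    ∀ d f c : List String,
      pvLoopA jobs d f c =
        (d ++ pvEntriesB jobs "done", f ++ pvEntriesB jobs "failed", c ++ pvEntriesB jobs "cancelled") := by
  induction jobs with
  | nil => intro d f c; simp [pvLoopA, pvEntriesB]
  | cons p rest ih =>
    intro d f c
    obtain ⟨job_id, jobL⟩ := p
    simp only [pvLoopA]
    by_cases h1 : (PySem.Dict.mk jobL).getD "status" "unknown" = "done"
    · simp only [h1, reduceIte, ih, pvEntriesB, List.filter_cons, beq_iff_eq,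
        String.reduceEq, List.map_cons, pvFmtB, List.append_assoc, List.singleton_append]
    · by_cases h2 : (PySem.Dict.mk jobL).getD "status" "unknown" = "failed"
      · simp only [h2, reduceIte, ih, pvEntriesB, List.filter_cons, beq_iff_eq,
          String.reduceEq, List.map_cons, pvFmtB, List.append_assoc, List.singleton_append]
        split_ifs <;> simp [String.append_empty, String.append_assoc]
      · by_cases h3 : (PySem.Dict.mk jobL).getD "status" "unknown" = "cancelled"
        · simp only [h3, reduceIte, ih, pvEntriesB, List.filter_cons, beq_iff_eq,
            String.reduceEq, List.map_cons, pvFmtB, List.append_assoc, List.singleton_append]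
        · simp only [h1, h2, h3, reduceIte, ih, pvEntriesB, List.filter_cons, beq_iff_eq]

-- merge the literal pieces of B's table-driven f-string into A's literal pieces
theorem pvPart_merge (e sp l co n j : String) (h1 : e ++ " " = sp) (h2 : " " ++ l ++ ": " = co) :
    e ++ " " ++ n ++ " " ++ l ++ ": " ++ j = sp ++ n ++ co ++ j := by
  subst h1 h2
  simp [String.append_assoc]

-- ===== VERDICT (by name: the statement is the Claim_ definition above) =====
theorem analyze_job_completion_py_spec : Claim_equal_analyze_job_completion_py := by
  intro jobs _
  unfold Spec_analyze_job_completion_py analyze_job_completion_py analyze_job_completion_py_alt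
  rw [pvLoop_eq jobs [] [] []]
  simp only [List.nil_append, pvTableB, List.foldl_cons, List.foldl_nil]
  rw [pvPart_merge "✅" "✅ " "succeeded" " succeeded: " _ _ (by decide) (by decide),
      pvPart_merge "❌" "❌ " "failed" " failed: " _ _ (by decide) (by decide),
      pvPart_merge "🚫" "🚫 " "cancelled" " cancelled: " _ _ (by decide) (by decide)]
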